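-- pv_equiv track=rewrite | github.com/ByeonSeungHa/Python | Busan Study/31.py | solution
-- ===== SOURCE A (Python) =====
-- def solution(price, money):
--     answer = 0
--     s = 0
--     for i in price:
--         s += i
--         if i > money:
--             return -1
--         else :
--             answer = money - s
--     return answer
-- ===== SOURCE B (Python) =====
-- def solution(price, money):
--     if not price:
--         return 0
--     if any(i > money for i in price):
--         return -1
--     return money - sum(price)
-- ===== Notes on version B (the rewrite author's own statement) =====
-- stated objective: simpler
-- what changed: Replaces A's single fused loop carrying a running sum and a rewritten answer with an explicit empty guard, an any() membership scan for an oversized element, and a closed-form money - sum(price).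
import Mathlib
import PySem

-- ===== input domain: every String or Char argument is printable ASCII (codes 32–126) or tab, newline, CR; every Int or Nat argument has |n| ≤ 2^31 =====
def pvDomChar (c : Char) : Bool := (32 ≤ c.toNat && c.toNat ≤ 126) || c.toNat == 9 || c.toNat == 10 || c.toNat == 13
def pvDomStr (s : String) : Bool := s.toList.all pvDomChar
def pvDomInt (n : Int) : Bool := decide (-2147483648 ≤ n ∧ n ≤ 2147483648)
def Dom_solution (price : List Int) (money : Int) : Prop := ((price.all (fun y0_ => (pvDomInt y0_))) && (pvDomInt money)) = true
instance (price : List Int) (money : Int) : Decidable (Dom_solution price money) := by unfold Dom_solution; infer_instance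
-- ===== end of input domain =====

-- B replaces A's fused accumulate-and-check loop by an empty guard, an any-scan, and money - sum.
-- ===== PORT A =====
-- the for-loop of A: state = (running sum s, answer); early return -1 when i > money
def solutionLoop (price : List Int) (money s answer : Int) : Int :=
  match price with
  | [] => answer
  | i :: rest =>
    let s' := s + i
    if i > money then -1 else solutionLoop rest money s' (money - s')

def solution (price : List Int) (money : Int) : Int :=
  solutionLoop price money 0 0

-- ===== PORT B =====
def solution_alt (price : List Int) (money : Int) : Int :=
  if price.isEmpty then 0
  else if price.any (fun i => decide (i > money)) then -1
  else money - price.sum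

-- ===== PRECONDITION & SPEC =====
def Spec_solution (price : List Int) (money : Int) (out : Int) : Prop := out = solution_alt price money
instance (price : List Int) (money : Int) (out : Int) : Decidable (Spec_solution price money out) := by unfold Spec_solution; infer_instance

-- ===== CLAIM (what is proved, stated in full; the proofs are below) =====
def Claim_equal_solution : Prop := ∀ (price : List Int) (money : Int), Dom_solution price money → Spec_solution price money (solution price money)

-- ===== LEMMAS AND PROOFS =====
lemma solutionLoop_eq (price : List Int) (money : Int) : ∀ (s a : Int),
    solutionLoop price money s a =
      if price.isEmpty then a
      else if price.any (fun i => decide (i > money)) then -1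
      else money - (s + price.sum) := by
  induction price with
  | nil => intro s a; simp [solutionLoop]
  | cons i rest ih =>
    intro s a
    simp only [solutionLoop, List.isEmpty_cons, List.any_cons, List.sum_cons]
    by_cases h : i > money
    · simp [h]
    · rw [ih]
      by_cases hr : rest.isEmpty
      · rcases List.isEmpty_iff.mp hr with rfl
        simp [h]
      · simp [h, hr]
        ring_nf

-- ===== VERDICT (by name: the statement is the Claim_ definition above) =====
theorem solution_spec : Claim_equal_solution := by
  intro price money _
  unfold Spec_solution solution solution_alt
  rw [solutionLoop_eq]
  cases price <;> simp
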